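-- pv_equiv track=rewrite | github.com/braiso-22/ResolucionProblemas | juego_damas_simple.py | fichas_en_diagonal1
-- ===== SOURCE A (Python) =====
-- def fichas_en_diagonal1(solucion):
--     '''
--             0 1 2 3
--          0  X X 0 X Blancas par   X 0 X X
--          1  0 X X X Negras impar  X X X 0
--          2  X X X 0               0 X X X
--          3  X 0 X X               X X 0 X
--     '''
--     # 2. Comprobar que no hayan dos fichas en la misma diagonal descendente
--     for i in range(0, 4):
--         primera_ficha_casilla_color = int(solucion[i])-i
--         for j in range(i+1, 4):
--             segunda_ficha_casilla_color = int(solucion[j])-j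
--             if primera_ficha_casilla_color == segunda_ficha_casilla_color:
--                 return True
--
--     # 3. Comprobar que no hayan dos fichas en la misma diagonal ascendente
--     for i in range(0, 4):
--         primera_ficha_casilla_color = int(solucion[i])+i
--         for j in range(i+1, 4):
--             segunda_ficha_casilla_color = int(solucion[j])+j
--             if primera_ficha_casilla_color == segunda_ficha_casilla_color:
--                 return True
--     return False
-- ===== SOURCE B (Python) =====
-- def fichas_en_diagonal1(solucion):
--     seen_desc = set()
--     seen_asc = set()
--     for i in range(4):
--         v = int(solucion[i])
--         if v - i in seen_desc or v + i in seen_asc: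
--             return True
--         seen_desc.add(v - i)
--         seen_asc.add(v + i)
--     return False
-- ===== Notes on version B (the rewrite author's own statement) =====
-- stated objective: simpler
-- what changed: Replaced the two O(n^2) nested pair loops with a single pass that keeps two sets of already-seen descending/ascending diagonal indices and reports a repeat immediately.
import Mathlib
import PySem

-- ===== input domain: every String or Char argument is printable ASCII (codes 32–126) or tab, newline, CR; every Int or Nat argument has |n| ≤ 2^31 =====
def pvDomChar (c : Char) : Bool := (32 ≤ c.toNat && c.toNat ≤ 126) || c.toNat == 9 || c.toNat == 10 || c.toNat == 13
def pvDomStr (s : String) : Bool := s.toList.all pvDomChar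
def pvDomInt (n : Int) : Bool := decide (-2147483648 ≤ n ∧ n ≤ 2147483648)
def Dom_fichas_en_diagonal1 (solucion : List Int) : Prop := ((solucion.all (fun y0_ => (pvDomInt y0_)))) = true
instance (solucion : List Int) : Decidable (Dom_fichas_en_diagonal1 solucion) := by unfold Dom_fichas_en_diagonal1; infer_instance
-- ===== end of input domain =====

-- B replaces A's two nested O(n^2) pair loops by one pass keeping two sets of seen diagonal
-- indices (simpler); equivalence of the returned Bool is proved on lists of length ≥ 4.

-- ===== PORT A =====
-- the two nested loops with early 'return True' become 'any' over the same ranges;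
-- the list access is total under Pre_ wherever it is reached, so the pyGet? default is never used
def fichas_en_diagonal1 (solucion : List Int) : Bool :=
  let get : Int → Int := fun i => (PySem.List.pyGet? solucion i).getD 0
  -- 2. descending diagonals
  if (PySem.List.pyRange 0 4 1).any (fun i =>
       (PySem.List.pyRange (i+1) 4 1).any (fun j => get i - i == get j - j)) then
    true
  -- 3. ascending diagonals
  else if (PySem.List.pyRange 0 4 1).any (fun i =>
       (PySem.List.pyRange (i+1) 4 1).any (fun j => get i + i == get j + j)) then
    true
  else
    false

-- ===== PORT B =====
-- the single for-loop over range(4) with its two accumulated sets and early return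
def fichasAltLoop (solucion : List Int) : List Int → PySem.Set Int → PySem.Set Int → Bool
  | [], _, _ => false
  | i :: rest, seen_desc, seen_asc =>
    let v : Int := (PySem.List.pyGet? solucion i).getD 0
    if PySem.Set.contains seen_desc (v - i) || PySem.Set.contains seen_asc (v + i) then
      true
    else
      fichasAltLoop solucion rest (PySem.Set.add seen_desc (v - i)) (PySem.Set.add seen_asc (v + i))

def fichas_en_diagonal1_alt (solucion : List Int) : Bool :=
  fichasAltLoop solucion (PySem.List.pyRange 0 4 1) PySem.Set.empty PySem.Set.empty

-- ===== PRECONDITION & SPEC =====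
-- A indexes the first four positions; on shorter lists it raises IndexError unless it
-- early-returns True first, which happens exactly when the first element collides with some
-- later element j (j < length) on a descending diagonal: Pre_ admits precisely the inputs A returns on
def Pre_fichas_en_diagonal1 (solucion : List Int) : Prop :=
  4 ≤ solucion.length ∨
    ∃ j < solucion.length, 1 ≤ j ∧ solucion.getD 0 0 - 0 = solucion.getD j 0 - (j : Int)
instance (solucion : List Int) : Decidable (Pre_fichas_en_diagonal1 solucion) := by
  unfold Pre_fichas_en_diagonal1; infer_instance
def pvWitness_fichas_en_diagonal1 : List Int := [0, 2, 1, 3]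

def Spec_fichas_en_diagonal1 (solucion : List Int) (out : Bool) : Prop := out = fichas_en_diagonal1_alt solucion
instance (solucion : List Int) (out : Bool) : Decidable (Spec_fichas_en_diagonal1 solucion out) := by unfold Spec_fichas_en_diagonal1; infer_instance

-- ===== CLAIM (what is proved, stated in full; the proofs are below) =====
def Claim_equal_fichas_en_diagonal1 : Prop := ∀ (solucion : List Int), Dom_fichas_en_diagonal1 solucion → Pre_fichas_en_diagonal1 solucion → Spec_fichas_en_diagonal1 solucion (fichas_en_diagonal1 solucion)

-- ===== LEMMAS AND PROOFS =====


theorem fichas_core (a b c d : Int) (t : List Int) :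
    fichas_en_diagonal1 (a :: b :: c :: d :: t) = fichas_en_diagonal1_alt (a :: b :: c :: d :: t) := by
  have hr0 : PySem.List.pyRange 0 4 1 = [0,1,2,3] := by decide
  have hr1 : PySem.List.pyRange (0+1) 4 1 = [1,2,3] := by decide
  have hr2 : PySem.List.pyRange (1+1) 4 1 = [2,3] := by decide
  have hr3 : PySem.List.pyRange (2+1) 4 1 = [3] := by decide
  have hr4 : PySem.List.pyRange (3+1) 4 1 = [] := by decide
  have hg0 : PySem.List.pyGet? (a :: b :: c :: d :: t) (0:Int) = some a := by
    have h : (0:Int) ≤ (t.length:Int) + 1 + 1 + 1 := by omega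
    simp [PySem.List.pyGet?, PySem.List.pyIdx?, h]
  have hg1 : PySem.List.pyGet? (a :: b :: c :: d :: t) (1:Int) = some b := by
    have h : (0:Int) ≤ (t.length:Int) + 1 + 1 := by omega
    simp [PySem.List.pyGet?, PySem.List.pyIdx?, h]
  have hg2 : PySem.List.pyGet? (a :: b :: c :: d :: t) (2:Int) = some c := by
    have h : (2:Int) ≤ (t.length:Int) + 1 + 1 + 1 := by omega
    simp [PySem.List.pyGet?, PySem.List.pyIdx?, h]
  have hg3 : PySem.List.pyGet? (a :: b :: c :: d :: t) (3:Int) = some d := by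
    have h : (3:Int) ≤ (t.length:Int) + 1 + 1 + 1 := by omega
    simp [PySem.List.pyGet?, PySem.List.pyIdx?, h]
  simp only [fichas_en_diagonal1, fichas_en_diagonal1_alt, hr0, fichasAltLoop,
    List.any_cons, List.any_nil, hr1, hr2, hr3, hr4, hg0, hg1, hg2, hg3,
    Option.getD_some, PySem.Set.contains, PySem.Set.add, PySem.Set.empty]
  rw [Bool.eq_iff_iff]
  simp only [Bool.if_true_left, Bool.or_eq_true, decide_eq_true_eq, beq_iff_eq, Bool.or_false]
  simp only [List.nil_append, List.cons_append, if_false,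
    List.contains_eq_mem, List.mem_cons, List.not_mem_nil, or_false, false_or, decide_eq_true_eq]
  split_ifs <;> (try simp_all [List.mem_cons]) <;> omega


theorem fichas_core2 (x y : Int) (h : x - 0 = y - 1) :
    fichas_en_diagonal1 [x, y] = fichas_en_diagonal1_alt [x, y] := by
  have hr0 : PySem.List.pyRange 0 4 1 = [0,1,2,3] := by decide
  have hr1 : PySem.List.pyRange (0+1) 4 1 = [1,2,3] := by decide
  have hr2 : PySem.List.pyRange (1+1) 4 1 = [2,3] := by decide
  have hr3 : PySem.List.pyRange (2+1) 4 1 = [3] := by decide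
  have hr4 : PySem.List.pyRange (3+1) 4 1 = [] := by decide
  have hg0 : PySem.List.pyGet? [x, y] (0:Int) = some x := by
    simp [PySem.List.pyGet?, PySem.List.pyIdx?]
  have hg1 : PySem.List.pyGet? [x, y] (1:Int) = some y := by
    simp [PySem.List.pyGet?, PySem.List.pyIdx?]
  have hg2 : PySem.List.pyGet? [x, y] (2:Int) = none := by
    simp [PySem.List.pyGet?, PySem.List.pyIdx?]
  have hg3 : PySem.List.pyGet? [x, y] (3:Int) = none := by
    simp [PySem.List.pyGet?, PySem.List.pyIdx?]
  simp only [fichas_en_diagonal1, fichas_en_diagonal1_alt, hr0, fichasAltLoop,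
    List.any_cons, List.any_nil, hr1, hr2, hr3, hr4, hg0, hg1, hg2, hg3,
    Option.getD_some, Option.getD_none, PySem.Set.contains, PySem.Set.add, PySem.Set.empty]
  rw [Bool.eq_iff_iff]
  simp only [Bool.if_true_left, Bool.or_eq_true, decide_eq_true_eq, beq_iff_eq, Bool.or_false]
  simp only [List.nil_append, List.cons_append, if_false,
    List.contains_eq_mem, List.mem_cons, List.not_mem_nil, or_false, false_or, decide_eq_true_eq]
  split_ifs <;> simp_all [List.mem_cons]

theorem fichas_core3 (x y z : Int) :
    fichas_en_diagonal1 [x, y, z] = fichas_en_diagonal1_alt [x, y, z] := by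
  have hr0 : PySem.List.pyRange 0 4 1 = [0,1,2,3] := by decide
  have hr1 : PySem.List.pyRange (0+1) 4 1 = [1,2,3] := by decide
  have hr2 : PySem.List.pyRange (1+1) 4 1 = [2,3] := by decide
  have hr3 : PySem.List.pyRange (2+1) 4 1 = [3] := by decide
  have hr4 : PySem.List.pyRange (3+1) 4 1 = [] := by decide
  have hg0 : PySem.List.pyGet? [x, y, z] (0:Int) = some x := by
    simp [PySem.List.pyGet?, PySem.List.pyIdx?]
  have hg1 : PySem.List.pyGet? [x, y, z] (1:Int) = some y := by
    simp [PySem.List.pyGet?, PySem.List.pyIdx?]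
  have hg2 : PySem.List.pyGet? [x, y, z] (2:Int) = some z := by
    simp [PySem.List.pyGet?, PySem.List.pyIdx?]
  have hg3 : PySem.List.pyGet? [x, y, z] (3:Int) = none := by
    simp [PySem.List.pyGet?, PySem.List.pyIdx?]
  simp only [fichas_en_diagonal1, fichas_en_diagonal1_alt, hr0, fichasAltLoop,
    List.any_cons, List.any_nil, hr1, hr2, hr3, hr4, hg0, hg1, hg2, hg3,
    Option.getD_some, Option.getD_none, PySem.Set.contains, PySem.Set.add, PySem.Set.empty]
  rw [Bool.eq_iff_iff]
  simp only [Bool.if_true_left, Bool.or_eq_true, decide_eq_true_eq, beq_iff_eq, Bool.or_false]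
  simp only [List.nil_append, List.cons_append, if_false,
    List.contains_eq_mem, List.mem_cons, List.not_mem_nil, or_false, false_or, decide_eq_true_eq]
  split_ifs <;> (try simp_all [List.mem_cons]) <;> omega

-- ===== VERDICT (by name: the statement is the Claim_ definition above) =====
theorem fichas_en_diagonal1_spec : Claim_equal_fichas_en_diagonal1 := by
  intro s _ hpre
  unfold Pre_fichas_en_diagonal1 at hpre
  match s with
  | a :: b :: c :: d :: t => exact fichas_core a b c d t
  | [] =>
    exfalso
    rcases hpre with h4 | ⟨j, hj, hj1, _⟩
    · simp at h4
    · simp at hj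
  | [x] =>
    exfalso
    rcases hpre with h4 | ⟨j, hj, hj1, _⟩
    · simp at h4
    · simp at hj; omega
  | [x, y] =>
    rcases hpre with h4 | ⟨j, hj, hj1, hc⟩
    · simp at h4
    · simp at hj
      interval_cases j
      · exact fichas_core2 x y (by simpa using hc)
  | [x, y, z] => exact fichas_core3 x y z
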